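-- pv_equiv track=rewrite | github.com/victorplusc/Algorithms | Leetcode/748. Shortest Completing Word.py | shortestCompletingWord
-- ===== SOURCE A (Python) =====
-- from typing import List
--
-- def shortestCompletingWord(licensePlate: str, words: List[str]) -> str:
--     licensePlate = licensePlate.lower()
--     neededCharacters = {}
--
--     for i in licensePlate:
--         if i >= "a" and i <= "z":
--             if i not in neededCharacters:
--                 neededCharacters[i] = 1
--             else:
--                 neededCharacters[i] += 1
--
--     smallest = ""
--
--     for word in words:
--
--         enough = True
--         temp = {}
--
--         for char in word:
--             if char in neededCharacters:
--                 if char in temp: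
--                     temp[char] += 1
--                 else:
--                     temp[char] = 1
--
--         try:
--             for count in neededCharacters:
--                 if neededCharacters[count] > temp[count]:
--                     enough = False
--
--             if enough == True and smallest == "":
--                 smallest = word
--             if enough == True and len(smallest) > len(word):
--                 smallest = word
--         except:
--             pass
--
--     return smallest
-- ===== SOURCE B (Python) =====
-- def shortestCompletingWord(licensePlate, words):
--     plate = licensePlate.lower()
--     needed = {c: plate.count(c) for c in plate if 'a' <= c <= 'z'}
--     for word in sorted(words, key=len):
--         if all(word.count(c) >= n for c, n in needed.items()):
--             return word
--     return ""
-- ===== Notes on version B (the rewrite author's own statement) =====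
-- stated objective: idiomatic
-- what changed: B replaces A's incremental dicts and best-so-far tracking by a needed-count dict built with str.count and a single scan over the words stably sorted by length, returning the first covering word.
-- intended difference: When the plate contains no letters and words contains the empty string but does not end with it, A returns the first shortest word occurring after the last empty string (every word trivially qualifies and the empty smallest resets A's tracking), while B returns the empty string, which is the shortest completing word and the intended answer. — e.g. on shortestCompletingWord("12", ["", "a"]): A returns "a", B returns ""
import Mathlib
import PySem

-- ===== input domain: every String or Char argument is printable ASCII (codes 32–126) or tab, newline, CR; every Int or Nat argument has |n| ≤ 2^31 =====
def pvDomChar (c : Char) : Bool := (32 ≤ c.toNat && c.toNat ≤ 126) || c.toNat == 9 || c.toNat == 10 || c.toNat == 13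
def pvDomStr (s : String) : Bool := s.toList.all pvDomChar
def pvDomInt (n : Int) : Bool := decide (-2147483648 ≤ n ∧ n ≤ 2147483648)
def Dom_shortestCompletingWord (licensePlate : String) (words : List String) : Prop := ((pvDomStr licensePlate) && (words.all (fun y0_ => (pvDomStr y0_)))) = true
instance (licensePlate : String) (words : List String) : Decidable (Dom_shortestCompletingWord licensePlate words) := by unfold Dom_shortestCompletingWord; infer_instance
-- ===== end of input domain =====

-- B replaces A's incremental needed/temp dicts and best-so-far tracking by a dict comprehension over
-- the lowered plate plus one scan over the words stably sorted by length; on plates without letters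
-- where `words` contains "" but does not end with it, A's tracking resets and it returns a later word,
-- while B returns "" (the shortest completing word) — stated as the intended difference D_ below.


-- ===== PORT A =====
def pvNeededA (lp : List Char) : PySem.Dict Char Int :=
  lp.foldl (fun d i =>
    if 'a' ≤ i ∧ i ≤ 'z' then
      if ¬ (d.contains i = true) then d.insert i 1 else d.modify i 0 (· + 1)
    else d) PySem.Dict.empty

def pvTempA (needed : PySem.Dict Char Int) (w : List Char) : PySem.Dict Char Int :=
  w.foldl (fun t c =>
    if needed.contains c = true then
      if t.contains c = true then t.modify c 0 (· + 1) else t.insert c 1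
    else t) PySem.Dict.empty

-- the try-block: iterating the needed keys; `temp[count]` raising KeyError is `none`
def pvCheckA (needed temp : PySem.Dict Char Int) : Option Bool :=
  needed.keys.foldlM (fun enough c =>
    match temp.get? c with
    | none => none
    | some t => some (if needed.getD c 0 > t then false else enough)) true

def shortestCompletingWord (licensePlate : String) (words : List String) : String :=
  let lp := PySem.Str.lower licensePlate
  let needed := pvNeededA lp.toList
  words.foldl (fun smallest word =>
    match pvCheckA needed (pvTempA needed word.toList) with
    | none => smallest
    | some enough =>
      let s1 := if enough = true ∧ smallest = "" then word else smallest
      if enough = true ∧ PySem.Str.len s1 > PySem.Str.len word then word else s1) ""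

-- ===== PORT B =====
def pvNeededB (plate : List Char) : PySem.Dict Char Int :=
  plate.foldl (fun d c =>
    if 'a' ≤ c ∧ c ≤ 'z' then d.insert c ((PySem.Chars.count plate [c] : Int)) else d)
    PySem.Dict.empty

def pvCoversB (needed : PySem.Dict Char Int) (word : String) : Bool :=
  needed.items.all (fun p => (PySem.Chars.count word.toList [p.1] : Int) ≥ p.2)

def pvFirstB (needed : PySem.Dict Char Int) : List String → String
  | [] => ""
  | w :: ws => if pvCoversB needed w then w else pvFirstB needed ws

def shortestCompletingWord_alt (licensePlate : String) (words : List String) : String :=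
  let needed := pvNeededB (PySem.Str.lower licensePlate).toList
  pvFirstB needed (PySem.List.sorted words (fun w => PySem.Str.len w))

-- ===== PRECONDITION & SPEC =====
-- When the plate contains no ASCII letters and `words` contains "" but its last element is not "",
-- A returns the first shortest word after the last "" (every word trivially qualifies and the empty
-- `smallest` resets A's tracking), while B returns "", the shortest completing word and the intended answer.
def D_shortestCompletingWord (licensePlate : String) (words : List String) : Prop :=
  (∀ c ∈ licensePlate.toList, ¬ (('a' ≤ c ∧ c ≤ 'z') ∨ ('A' ≤ c ∧ c ≤ 'Z'))) ∧
  "" ∈ words ∧ words.getLast? ≠ some ""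
instance (licensePlate : String) (words : List String) : Decidable (D_shortestCompletingWord licensePlate words) := by
  unfold D_shortestCompletingWord; infer_instance

def Spec_shortestCompletingWord (licensePlate : String) (words : List String) (out : String) : Prop :=
  ¬ D_shortestCompletingWord licensePlate words → out = shortestCompletingWord_alt licensePlate words
instance (licensePlate : String) (words : List String) (out : String) : Decidable (Spec_shortestCompletingWord licensePlate words out) := by unfold Spec_shortestCompletingWord; infer_instance

def pvDiffWitness_shortestCompletingWord : String × List String := ("12", ["", "a"])
def pvDiffWitnessOut_shortestCompletingWord : String × String := ("a", "")

-- ===== CLAIM (what is proved, stated in full; the proofs are below) =====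
def Claim_unchanged_shortestCompletingWord : Prop := ∀ (licensePlate : String) (words : List String), Dom_shortestCompletingWord licensePlate words → Spec_shortestCompletingWord licensePlate words (shortestCompletingWord licensePlate words)
def Claim_changed_shortestCompletingWord : Prop := Dom_shortestCompletingWord (pvDiffWitness_shortestCompletingWord.1) (pvDiffWitness_shortestCompletingWord.2) ∧ D_shortestCompletingWord (pvDiffWitness_shortestCompletingWord.1) (pvDiffWitness_shortestCompletingWord.2) ∧ shortestCompletingWord (pvDiffWitness_shortestCompletingWord.1) (pvDiffWitness_shortestCompletingWord.2) = pvDiffWitnessOut_shortestCompletingWord.1 ∧ shortestCompletingWord_alt (pvDiffWitness_shortestCompletingWord.1) (pvDiffWitness_shortestCompletingWord.2) = pvDiffWitnessOut_shortestCompletingWord.2 ∧ pvDiffWitnessOut_shortestCompletingWord.1 ≠ pvDiffWitnessOut_shortestCompletingWord.2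
def Claim_exact_shortestCompletingWord : Prop := ∀ (licensePlate : String) (words : List String), Dom_shortestCompletingWord licensePlate words → D_shortestCompletingWord licensePlate words → shortestCompletingWord licensePlate words ≠ shortestCompletingWord_alt licensePlate words

-- ===== LEMMAS AND PROOFS =====

-- the letter filter applied to the lowered plate
def pvLetter (c : Char) : Bool := decide ('a' ≤ c ∧ c ≤ 'z')

theorem pv_char_le_iff (a b : Char) : a ≤ b ↔ a.toNat ≤ b.toNat := by
  rw [Char.le_def, Char.toNat, Char.toNat, UInt32.le_iff_toNat_le]

theorem pv_lowerChar_letter (c : Char)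
    (h : ('a' ≤ c ∧ c ≤ 'z') ∨ ('A' ≤ c ∧ c ≤ 'Z')) :
    pvLetter (PySem.Chars.lowerChar c) = true := by
  rcases h with ⟨h1, h2⟩ | ⟨h1, h2⟩
  · have hup : PySem.Chars.isupper c = false := by
      simp only [PySem.Chars.isupper, Bool.and_eq_false_iff, decide_eq_false_iff_not]
      right
      rw [pv_char_le_iff] at h1 ⊢
      simp at h1 ⊢
      omega
    simp [PySem.Chars.lowerChar, hup, pvLetter, h1, h2]
  · have hup : PySem.Chars.isupper c = true := by
      simp [PySem.Chars.isupper, h1, h2]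
    have h1' : 65 ≤ c.toNat := by rw [pv_char_le_iff] at h1; simpa using h1
    have h2' : c.toNat ≤ 90 := by rw [pv_char_le_iff] at h2; simpa using h2
    have hval : (Char.ofNat (c.toNat + 32)).toNat = c.toNat + 32 := by
      rw [Char.toNat_ofNat, if_pos]
      exact Or.inl (by omega)
    simp only [PySem.Chars.lowerChar, hup, if_true, pvLetter, decide_eq_true_eq]
    constructor
    · rw [pv_char_le_iff, hval]; simp; omega
    · rw [pv_char_le_iff, hval]; simp; omega

theorem pv_lowerChar_not_letter (c : Char)
    (h : ¬ (('a' ≤ c ∧ c ≤ 'z') ∨ ('A' ≤ c ∧ c ≤ 'Z'))) :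
    pvLetter (PySem.Chars.lowerChar c) = false := by
  have hup : PySem.Chars.isupper c = false := by
    simp only [PySem.Chars.isupper, Bool.and_eq_false_iff, decide_eq_false_iff_not]
    by_cases hA : 'A' ≤ c
    · exact Or.inr (fun hZ => h (Or.inr ⟨hA, hZ⟩))
    · exact Or.inl hA
  simp only [PySem.Chars.lowerChar, hup, Bool.false_eq_true, ↓reduceIte, pvLetter,
    decide_eq_false_iff_not]
  exact fun hc => h (Or.inl hc)

-- Python str.count with a single-character needle is character count
theorem pv_go_singleton (c : Char) : ∀ fuel (l : List Char) acc, l.length ≤ fuel →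
    PySem.Chars.count.go [c] fuel l acc = acc + l.count c := by
  intro fuel
  induction fuel with
  | zero =>
    intro l acc h
    have : l = [] := List.eq_nil_of_length_eq_zero (by omega)
    subst this; simp [PySem.Chars.count.go]
  | succ n ih =>
    intro l acc h
    cases l with
    | nil => simp [PySem.Chars.count.go]
    | cons x t =>
      simp only [PySem.Chars.count.go]
      by_cases hx : x = c
      · subst hx
        have hp : List.isPrefixOf [x] (x :: t) = true := by simp [List.isPrefixOf]
        simp only [hp, ↓reduceIte, List.length_cons, List.length_nil, List.drop_succ_cons,
          List.drop_zero]
        rw [ih t _ (by simpa using h)]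
        simp [List.count_cons]; omega
      · have hp : List.isPrefixOf [c] (x :: t) = false := by
          simp [List.isPrefixOf]; exact fun h' => (hx h'.symm).elim
        simp only [hp, Bool.false_eq_true, ↓reduceIte]
        rw [ih t _ (by simpa using h)]
        simp [hx]

theorem pv_count_singleton (s : List Char) (c : Char) :
    PySem.Chars.count s [c] = s.count c := by
  simp only [PySem.Chars.count, List.isEmpty_cons, Bool.false_eq_true, ↓reduceIte]
  simpa using pv_go_singleton c s.length s 0 le_rfl

theorem pv_insert_one_eq_modify (d : PySem.Dict Char Int) (c : Char) (h : ¬ d.contains c = true) :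
    d.insert c 1 = d.modify c 0 (· + 1) := by
  simp [PySem.Dict.modify, PySem.Dict.getD_of_not_contains _ _ (by simpa using h)]

-- both counting loops are Counter of the filtered list
theorem pv_neededA_eq_counter (lp : List Char) :
    pvNeededA lp = PySem.Dict.counter (lp.filter pvLetter) := by
  rw [PySem.Dict.counter_eq_foldl, List.foldl_filter]
  unfold pvNeededA
  apply PySem.List.foldl_congr_mem
  intro acc x _
  by_cases hl : 'a' ≤ x ∧ x ≤ 'z'
  · by_cases hc : acc.contains x = true
    · simp [pvLetter, hl, hc]
    · simp [pvLetter, hl, hc, pv_insert_one_eq_modify acc x hc]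
  · simp [pvLetter, hl]

theorem pv_tempA_eq_counter (D : PySem.Dict Char Int) (w : List Char) :
    pvTempA D w = PySem.Dict.counter (w.filter (fun c => D.contains c)) := by
  rw [PySem.Dict.counter_eq_foldl, List.foldl_filter]
  unfold pvTempA
  apply PySem.List.foldl_congr_mem
  intro acc x _
  by_cases hl : D.contains x = true
  · by_cases hc : acc.contains x = true
    · simp [hl, hc]
    · simp [hl, hc, pv_insert_one_eq_modify acc x hc]
  · simp [hl]

theorem pv_getD_foldl_insert (K : Char → Int) : ∀ (l : List Char) (d : PySem.Dict Char Int) (x : Char),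
    (l.foldl (fun d c => d.insert c (K c)) d).getD x 0 = if x ∈ l then K x else d.getD x 0 := by
  intro l
  induction l with
  | nil => simp
  | cons c t ih =>
    intro d x
    simp only [List.foldl_cons]
    rw [ih]
    by_cases hx : x ∈ t
    · simp [hx]
    · by_cases hxc : x = c
      · simp [hx, hxc, PySem.Dict.getD_insert]
      · simp [hx, hxc, PySem.Dict.getD_insert]

theorem pv_neededB_eq_counter (lp : List Char) :
    pvNeededB lp = PySem.Dict.counter (lp.filter pvLetter) := by
  have hB : pvNeededB lp = (lp.filter pvLetter).foldl
      (fun d c => d.insert c ((PySem.Chars.count lp [c] : Int))) PySem.Dict.empty := by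
    rw [List.foldl_filter]
    unfold pvNeededB
    apply PySem.List.foldl_congr_mem
    intro acc x _
    by_cases hl : 'a' ≤ x ∧ x ≤ 'z' <;> simp [pvLetter, hl]
  rw [hB]
  have hnd : ((lp.filter pvLetter).foldl
      (fun d c => d.insert c ((PySem.Chars.count lp [c] : Int))) PySem.Dict.empty).keys.Nodup := by
    apply PySem.Dict.nodup_keys_foldl_insert (f := fun _ c => ((PySem.Chars.count lp [c] : Int)))
    simp [PySem.Dict.keys_empty]
  have hk : ((lp.filter pvLetter).foldl
      (fun d c => d.insert c ((PySem.Chars.count lp [c] : Int))) PySem.Dict.empty).keys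
      = PySem.Set.ofList (lp.filter pvLetter) := by
    rw [PySem.Dict.keys_foldl_insert (f := fun _ c => ((PySem.Chars.count lp [c] : Int))),
      PySem.Dict.keys_empty, PySem.Set.update_nil_left]
  apply PySem.Dict.ext
  rw [PySem.Dict.items_eq_map_keys _ hnd 0,
      PySem.Dict.items_eq_map_keys _ (PySem.Dict.nodup_keys_counter _) 0,
      PySem.Dict.keys_counter, hk]
  apply List.map_congr_left
  intro c hc
  have hcL : c ∈ lp.filter pvLetter := (PySem.Set.mem_ofList _ _).1 hc
  have hpl : pvLetter c = true := (List.mem_filter.1 hcL).2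
  rw [pv_getD_foldl_insert, if_pos hcL, PySem.Dict.getD_counter, pv_count_singleton,
      List.count_filter hpl]

theorem pv_covers_iff (L : List Char) (w : String) :
    pvCoversB (PySem.Dict.counter L) w = true ↔
      ∀ c ∈ L, (L.count c : Int) ≤ (w.toList.count c : Int) := by
  unfold pvCoversB
  rw [PySem.Dict.items_counter]
  simp only [List.all_map, List.all_eq_true, Function.comp, pv_count_singleton, ge_iff_le,
    decide_eq_true_eq]
  constructor
  · intro h c hc
    exact h c ((PySem.Set.mem_ofList _ _).2 hc)
  · intro h c hc
    exact h c ((PySem.Set.mem_ofList _ _).1 hc)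

theorem pv_checkFold (D T : PySem.Dict Char Int) : ∀ (ks : List Char) (b : Bool),
    (ks.foldlM (fun enough c =>
      match T.get? c with
      | none => none
      | some t => some (if D.getD c 0 > t then false else enough)) b) = some true
    ↔ b = true ∧ ∀ c ∈ ks, T.contains c = true ∧ D.getD c 0 ≤ T.getD c 0 := by
  intro ks
  induction ks with
  | nil => simp
  | cons c t ih =>
    intro b
    cases hT : T.get? c with
    | none =>
      have hTc : T.contains c = false := by
        rw [PySem.Dict.contains_eq_isSome_get?, hT]; rfl
      simp only [List.foldlM_cons, hT]
      constructor
      · intro h; exact absurd h (by simp)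
      · rintro ⟨-, h⟩
        have := (h c (by simp)).1
        rw [hTc] at this; exact absurd this (by simp)
    | some v =>
      have hTc : T.contains c = true := by
        rw [PySem.Dict.contains_eq_isSome_get?, hT]; rfl
      have hTD : T.getD c 0 = v := PySem.Dict.getD_of_get?_eq_some _ _ hT
      simp only [List.foldlM_cons, hT]
      rw [show ((some (if D.getD c 0 > v then false else b) >>= fun b' => t.foldlM _ b') =
        t.foldlM (fun enough c =>
          match T.get? c with
          | none => none
          | some t => some (if D.getD c 0 > t then false else enough))
          (if D.getD c 0 > v then false else b)) from rfl]
      rw [ih]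
      by_cases hD : D.getD c 0 > v
      · simp only [hD, ↓reduceIte]
        constructor
        · rintro ⟨h, -⟩; exact absurd h (by simp)
        · rintro ⟨-, h⟩
          have := (h c (by simp)).2
          omega
      · simp only [hD, ↓reduceIte]
        constructor
        · rintro ⟨hb, h⟩
          refine ⟨hb, ?_⟩
          intro x hx
          rcases List.mem_cons.1 hx with rfl | hx'
          · exact ⟨hTc, by rw [hTD]; omega⟩
          · exact h x hx'
        · rintro ⟨hb, h⟩
          exact ⟨hb, fun x hx => h x (List.mem_cons_of_mem _ hx)⟩

theorem pv_check_iff (L : List Char) (w : String) :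
    pvCheckA (PySem.Dict.counter L) (pvTempA (PySem.Dict.counter L) w.toList) = some true ↔
      pvCoversB (PySem.Dict.counter L) w = true := by
  rw [pv_covers_iff]
  unfold pvCheckA
  rw [pv_tempA_eq_counter, pv_checkFold, PySem.Dict.keys_counter]
  have hMcount : ∀ c ∈ L,
      (w.toList.filter (fun c => (PySem.Dict.counter L).contains c)).count c = w.toList.count c := by
    intro c hc
    apply List.count_filter
    rw [PySem.Dict.contains_counter]
    exact List.contains_iff_mem.2 hc
  constructor
  · rintro ⟨-, h⟩ c hc
    have h2 := (h c ((PySem.Set.mem_ofList _ _).2 hc)).2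
    rw [PySem.Dict.getD_counter, PySem.Dict.getD_counter, hMcount c hc] at h2
    exact h2
  · intro h
    refine ⟨rfl, ?_⟩
    intro c hc
    have hcL : c ∈ L := (PySem.Set.mem_ofList _ _).1 hc
    have hle := h c hcL
    have hwpos : 0 < w.toList.count c := by
      have : (0 : Int) < (L.count c : Int) := by
        have := List.count_pos_iff.2 hcL; omega
      omega
    constructor
    · rw [PySem.Dict.contains_counter]
      apply (fun h => List.contains_iff_mem.2 h)
      rw [List.mem_filter]
      refine ⟨List.count_pos_iff.1 hwpos, ?_⟩
      rw [PySem.Dict.contains_counter]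
      exact List.contains_iff_mem.2 hcL
    · rw [PySem.Dict.getD_counter, PySem.Dict.getD_counter, hMcount c hcL]
      exact hle

-- A's loop body, rewritten through the qualification predicate
theorem pv_bodyA_eq (L : List Char) (s w : String) :
    (match pvCheckA (PySem.Dict.counter L) (pvTempA (PySem.Dict.counter L) w.toList) with
      | none => s
      | some enough =>
        let s1 := if enough = true ∧ s = "" then w else s
        if enough = true ∧ PySem.Str.len s1 > PySem.Str.len w then w else s1)
    = if pvCoversB (PySem.Dict.counter L) w then
        (if s = "" then w else if PySem.Str.len s > PySem.Str.len w then w else s)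
      else s := by
  cases hc : pvCheckA (PySem.Dict.counter L) (pvTempA (PySem.Dict.counter L) w.toList) with
  | none =>
    have : ¬ pvCoversB (PySem.Dict.counter L) w = true := by
      intro h; rw [← pv_check_iff] at h; rw [hc] at h; cases h
    simp [this]
  | some enough =>
    cases enough with
    | false =>
      have : ¬ pvCoversB (PySem.Dict.counter L) w = true := by
        intro h; rw [← pv_check_iff] at h; rw [hc] at h; cases h
      simp [this]
    | true =>
      have hcov : pvCoversB (PySem.Dict.counter L) w = true := pv_check_iff L w |>.1 hc
      simp only [hcov, ↓reduceIte, true_and]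
      by_cases hs : s = ""
      · simp [hs]
      · simp [hs]

theorem pv_firstB_eq_find (D : PySem.Dict Char Int) (l : List String) :
    pvFirstB D l = ((l.find? (pvCoversB D)).getD "") := by
  induction l with
  | nil => rfl
  | cons w ws ih =>
    by_cases h : pvCoversB D w = true
    · simp [pvFirstB, h, List.find?_cons_of_pos]
    · simp only [pvFirstB, h]
      rw [List.find?_cons_of_neg (by simpa using h), ih]
      simp

-- stable insertion commutes with filter on an ordered list
theorem pv_filter_insertBy (Q : String → Bool) (x : String) (ys : List String)
    (hs : ys.Pairwise (fun a b => PySem.Str.len a ≤ PySem.Str.len b)) :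
    (PySem.List.insertBy (fun a b => decide (PySem.Str.len a < PySem.Str.len b)) x ys).filter Q
      = if Q x then PySem.List.insertBy (fun a b => decide (PySem.Str.len a < PySem.Str.len b)) x (ys.filter Q)
        else ys.filter Q := by
  induction ys with
  | nil =>
    by_cases hx : Q x <;> simp [PySem.List.insertBy, hx]
  | cons y t ih =>
    rcases List.pairwise_cons.1 hs with ⟨hy, ht⟩
    by_cases hlt : PySem.Str.len x < PySem.Str.len y
    · simp only [PySem.List.insertBy]
      rw [if_pos (by simpa using hlt)]
      have hall : ∀ z ∈ (y :: t).filter Q, PySem.Str.len x < PySem.Str.len z := by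
        intro z hz
        rcases List.mem_filter.1 hz with ⟨hz', -⟩
        rcases List.mem_cons.1 hz' with rfl | hz''
        · exact hlt
        · exact lt_of_lt_of_le hlt (hy z hz'')
      by_cases hx : Q x
      · rw [if_pos hx]
        have hfx : (x :: y :: t).filter Q = x :: (y :: t).filter Q := by
          simp [List.filter_cons, hx]
        rw [hfx]
        cases hf : (y :: t).filter Q with
        | nil => simp [PySem.List.insertBy]
        | cons z zs =>
          have hz : PySem.Str.len x < PySem.Str.len z := hall z (by rw [hf]; exact List.mem_cons_self)
          simp only [PySem.List.insertBy]
          rw [if_pos (by simpa using hz)]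
      · rw [if_neg hx]
        simp [List.filter_cons, hx]
    · simp only [PySem.List.insertBy]
      rw [if_neg (by simpa using hlt)]
      by_cases hqy : Q y
      · simp only [List.filter_cons, hqy, ↓reduceIte]
        rw [ih ht]
        by_cases hx : Q x
        · rw [if_pos hx, if_pos hx]
          simp only [PySem.List.insertBy]
          rw [if_neg (by simpa using hlt)]
        · rw [if_neg hx, if_neg hx]
      · simp only [List.filter_cons, hqy, Bool.false_eq_true, ↓reduceIte]
        exact ih ht

theorem pv_filter_sorted (Q : String → Bool) (ws : List String) :
    (PySem.List.sorted ws (fun w => PySem.Str.len w)).filter Q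
      = PySem.List.sorted (ws.filter Q) (fun w => PySem.Str.len w) := by
  induction ws using List.reverseRecOn with
  | nil => simp [PySem.List.sorted_eq_foldl_insertBy]
  | append_singleton ws x ih =>
    rw [PySem.List.sorted_eq_foldl_insertBy, List.foldl_append, List.foldl_cons, List.foldl_nil,
      ← PySem.List.sorted_eq_foldl_insertBy]
    rw [pv_filter_insertBy Q x _ (PySem.List.sorted_pairwise ws (fun w => PySem.Str.len w)), ih]
    by_cases hx : Q x
    · rw [if_pos hx]
      rw [List.filter_append]
      have : [x].filter Q = [x] := by simp [hx]
      rw [this]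
      rw [PySem.List.sorted_eq_foldl_insertBy (ws.filter Q ++ [x]), List.foldl_append,
        List.foldl_cons, List.foldl_nil, ← PySem.List.sorted_eq_foldl_insertBy]
    · rw [if_neg hx]
      rw [List.filter_append]
      have : [x].filter Q = [] := by simp [hx]
      rw [this, List.append_nil]

-- head of the insertion-sort fold is the running stable minimum
theorem pv_head_foldl_insertBy : ∀ (l : List String) (acc : List String) (h : String),
    acc.head? = some h →
    ((l.foldl (fun acc x => PySem.List.insertBy (fun a b => decide (PySem.Str.len a < PySem.Str.len b)) x acc) acc).head?)
      = some (l.foldl (fun m x => if PySem.Str.len x < PySem.Str.len m then x else m) h) := by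
  intro l
  induction l with
  | nil => intro acc h hh; simpa using hh
  | cons x t ih =>
    intro acc h hh
    cases acc with
    | nil => cases hh
    | cons a rest =>
      have ha : a = h := by simpa using hh
      subst ha
      simp only [List.foldl_cons]
      apply ih
      by_cases hlt : PySem.Str.len x < PySem.Str.len a
      · simp only [PySem.List.insertBy]
        rw [if_pos (by simpa using hlt), if_pos hlt]
        rfl
      · simp only [PySem.List.insertBy]
        rw [if_neg (by simpa using hlt), if_neg hlt]
        rfl

theorem pv_len_le_zero (s : String) (h : PySem.Str.len s ≤ 0) : s = "" := by
  apply String.toList_eq_nil_iff.mp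
  apply List.eq_nil_of_length_eq_zero
  simp only [PySem.Str.len] at h
  omega

-- A's tracking fold yields "" exactly when the processed list ends with ""
theorem pv_fold2_eq_empty_iff : ∀ (l : List String) (s : String),
    (l.foldl (fun s w => if s = "" then w else if PySem.Str.len s > PySem.Str.len w then w else s) s = "")
      ↔ ((l = [] ∧ s = "") ∨ l.getLast? = some "") := by
  intro l
  induction l with
  | nil => simp
  | cons w t ih =>
    intro s
    simp only [List.foldl_cons]
    rw [ih]
    have hbody : ((if s = "" then w else if PySem.Str.len s > PySem.Str.len w then w else s) = "") ↔ (w = "" ∨ (s = "" ∧ w = "")) := by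
      by_cases hs : s = ""
      · simp [hs]
      · simp only [hs, ↓reduceIte]
        by_cases hw : w = ""
        · subst hw
          have hlen : PySem.Str.len s > PySem.Str.len "" := by
            have hne : s.toList ≠ [] := fun hnil => hs (String.toList_eq_nil_iff.mp hnil)
            have hpos : 0 < s.toList.length := List.length_pos_iff.2 hne
            simp only [PySem.Str.len, gt_iff_lt]
            have : ("" : String).toList = [] := by decide
            rw [this]
            simpa using hpos
          simp [hlen, hs]
        · split_ifs with hlt <;> simp [hw, hs]
    cases t with
    | nil =>
      simp only [List.getLast?_nil, List.getLast?_singleton, hbody, Option.some.injEq,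
        reduceCtorEq]
      tauto
    | cons u v =>
      have h2 : (w :: u :: v).getLast? = (u :: v).getLast? := List.getLast?_cons_cons
      simp [h2]

theorem pv_fold2_eq_min : ∀ (T : List String) (s : String), s ≠ "" → (∀ x ∈ T, x ≠ "") →
    T.foldl (fun s w => if s = "" then w else if PySem.Str.len s > PySem.Str.len w then w else s) s
      = T.foldl (fun m x => if PySem.Str.len x < PySem.Str.len m then x else m) s := by
  intro T
  induction T with
  | nil => intro s _ _; rfl
  | cons x t ih =>
    intro s hs hall
    simp only [List.foldl_cons]
    rw [if_neg hs]
    have hx : x ≠ "" := hall x List.mem_cons_self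
    have hstep : (if PySem.Str.len s > PySem.Str.len x then x else s) ≠ "" := by
      split_ifs <;> assumption
    rw [ih _ hstep (fun y hy => hall y (List.mem_cons_of_mem _ hy))]

-- A's best-so-far fold equals the first qualifying word of the stable length-sorted list
theorem pv_main (Q : String → Bool) (ws : List String)
    (H : "" ∉ ws.filter Q ∨ (ws.filter Q).getLast? = some "") :
    ws.foldl (fun s w => if Q w then (if s = "" then w else if PySem.Str.len s > PySem.Str.len w then w else s) else s) ""
      = ((PySem.List.sorted ws (fun w => PySem.Str.len w)).find? Q).getD "" := by
  rw [← List.foldl_filter, ← List.head?_filter, pv_filter_sorted]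
  cases hWc : ws.filter Q with
  | nil => simp [PySem.List.sorted_eq_foldl_insertBy]
  | cons w T =>
    rw [hWc] at H
    by_cases hmem : "" ∈ (w :: T)
    · have hlast : (w :: T).getLast? = some "" := by
        rcases H with h | h
        · exact absurd hmem h
        · exact h
      have hL : (w :: T).foldl (fun s w => if s = "" then w else if PySem.Str.len s > PySem.Str.len w then w else s) "" = "" := by
        rw [pv_fold2_eq_empty_iff]
        exact Or.inr hlast
      rw [hL]
      cases hsrt : PySem.List.sorted (w :: T) (fun w => PySem.Str.len w) with
      | nil =>
        exact absurd ((PySem.List.sorted_eq_nil_iff _ _ _).1 hsrt) (by simp)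
      | cons r t =>
        have hr : PySem.Str.len r ≤ PySem.Str.len "" :=
          PySem.List.key_head_sorted_le _ _ hsrt "" hmem
        have hr0 : r = "" := by
          apply pv_len_le_zero
          have : PySem.Str.len "" = 0 := by decide
          omega
        simp [hr0]
    · have hw : w ≠ "" := fun h => hmem (h ▸ List.mem_cons_self)
      have hT : ∀ x ∈ T, x ≠ "" := fun x hx h =>
        hmem (h ▸ List.mem_cons_of_mem _ hx)
      simp only [List.foldl_cons]
      simp only [if_true]
      rw [pv_fold2_eq_min T w hw hT, PySem.List.sorted_eq_foldl_insertBy, List.foldl_cons]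
      have hacc : (PySem.List.insertBy (fun a b => decide (PySem.Str.len a < PySem.Str.len b)) w []) = [w] := by
        simp [PySem.List.insertBy]
      rw [hacc, pv_head_foldl_insertBy T [w] w rfl]
      rfl

-- unchanged outside D_: derive the side condition of pv_main from ¬D_
theorem pv_H_of_not_D (licensePlate : String) (words : List String)
    (hnD : ¬ D_shortestCompletingWord licensePlate words)
    (L : List Char)
    (hLdef : L = (PySem.Str.lower licensePlate).toList.filter pvLetter) :
    "" ∉ words.filter (pvCoversB (PySem.Dict.counter L))
      ∨ (words.filter (pvCoversB (PySem.Dict.counter L))).getLast? = some "" := by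
  unfold D_shortestCompletingWord at hnD
  by_cases hQ : pvCoversB (PySem.Dict.counter L) "" = true
  · -- every needed letter is covered by "": L must be empty
    have hLnil : L = [] := by
      cases hLe : L with
      | nil => rfl
      | cons a as =>
        have := (pv_covers_iff L "").1 hQ a (by rw [hLe]; exact List.mem_cons_self)
        have hc : 0 < L.count a := List.count_pos_iff.2 (by rw [hLe]; exact List.mem_cons_self)
        have h0 : ("" : String).toList.count a = 0 := by
          have he : ("" : String).toList = [] := by decide
          rw [he]; rfl
        rw [h0] at this
        omega
    -- with no needed letters the plate has no letters, so ¬D_ gives a words-condition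
    have hnolet : ∀ c ∈ licensePlate.toList, ¬ (('a' ≤ c ∧ c ≤ 'z') ∨ ('A' ≤ c ∧ c ≤ 'Z')) := by
      intro c hc hlet
      have hmem : PySem.Chars.lowerChar c ∈ (PySem.Str.lower licensePlate).toList := by
        rw [PySem.Str.toList_lower]
        exact List.mem_map.2 ⟨c, hc, rfl⟩
      have : PySem.Chars.lowerChar c ∈ L := by
        rw [hLdef]
        exact List.mem_filter.2 ⟨hmem, pv_lowerChar_letter c hlet⟩
      rw [hLnil] at this
      cases this
    rcases not_and_or.1 hnD with h | h
    · exact absurd hnolet h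
    · rcases not_and_or.1 h with h | h
      · exact Or.inl (fun hm => h (List.mem_filter.1 hm).1)
      · have hlast : words.getLast? = some "" := not_not.1 h
        obtain ⟨init, rfl⟩ := List.getLast?_eq_some_iff.1 hlast
        rw [List.filter_append]
        have : [("" : String)].filter (pvCoversB (PySem.Dict.counter L)) = [""] := by simp [hQ]
        rw [this]
        exact Or.inr List.getLast?_concat
  · exact Or.inl (fun hm => hQ (List.mem_filter.1 hm).2)

-- ===== VERDICT (by name: the statement is the Claim_ definition above) =====
theorem shortestCompletingWord_spec : Claim_unchanged_shortestCompletingWord := by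
  intro licensePlate words _ hnD
  show shortestCompletingWord licensePlate words = shortestCompletingWord_alt licensePlate words
  unfold shortestCompletingWord shortestCompletingWord_alt
  simp only
  rw [pv_neededA_eq_counter, pv_neededB_eq_counter, pv_firstB_eq_find]
  rw [PySem.List.foldl_congr_mem words _
    (fun s w => if pvCoversB (PySem.Dict.counter ((PySem.Str.lower licensePlate).toList.filter pvLetter)) w then
        (if s = "" then w else if PySem.Str.len s > PySem.Str.len w then w else s)
      else s) ""
    (fun acc x _ => pv_bodyA_eq _ acc x)]
  exact pv_main _ words (pv_H_of_not_D licensePlate words hnD _ rfl)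

set_option maxRecDepth 16000 in
theorem shortestCompletingWord_changed : Claim_changed_shortestCompletingWord := by
  unfold Claim_changed_shortestCompletingWord
  refine ⟨by decide, ?_, by decide, by decide, by decide⟩
  show D_shortestCompletingWord "12" ["", "a"]
  refine ⟨?_, List.mem_cons_self, by decide⟩
  have h12 : "12".toList = ['1', '2'] := by decide
  rw [h12]
  intro c hc
  fin_cases hc <;> decide

theorem shortestCompletingWord_tight : Claim_exact_shortestCompletingWord := by
  intro licensePlate words _ hD
  obtain ⟨hnolet, hmem, hlast⟩ := hD
  have hwne : words ≠ [] := fun h => by rw [h] at hmem; cases hmem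
  have hL : (PySem.Str.lower licensePlate).toList.filter pvLetter = [] := by
    rw [List.filter_eq_nil_iff]
    intro c hc
    rw [PySem.Str.toList_lower] at hc
    obtain ⟨c0, hc0, rfl⟩ := List.mem_map.1 hc
    simp [pv_lowerChar_not_letter c0 (hnolet c0 hc0)]
  have hQ : ∀ w : String, pvCoversB (PySem.Dict.counter ([] : List Char)) w = true := by
    intro w; rfl
  -- A's value
  have hA : shortestCompletingWord licensePlate words
      = words.foldl (fun s w => if s = "" then w else if PySem.Str.len s > PySem.Str.len w then w else s) "" := by
    unfold shortestCompletingWord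
    simp only
    rw [pv_neededA_eq_counter, hL]
    rw [PySem.List.foldl_congr_mem words _
      (fun s w => if pvCoversB (PySem.Dict.counter ([] : List Char)) w then
          (if s = "" then w else if PySem.Str.len s > PySem.Str.len w then w else s)
        else s) ""
      (fun acc x _ => pv_bodyA_eq _ acc x)]
    apply PySem.List.foldl_congr_mem
    intro acc x _
    rw [hQ x, if_pos rfl]
  have hAne : shortestCompletingWord licensePlate words ≠ "" := by
    rw [hA, Ne, pv_fold2_eq_empty_iff]
    rintro (⟨h, -⟩ | h)
    · exact hwne h
    · exact hlast h
  -- B's value is ""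
  have hB : shortestCompletingWord_alt licensePlate words = "" := by
    unfold shortestCompletingWord_alt
    simp only
    rw [pv_neededB_eq_counter, hL, pv_firstB_eq_find]
    cases hsrt : PySem.List.sorted words (fun w => PySem.Str.len w) with
    | nil => rfl
    | cons r t =>
      have hr : PySem.Str.len r ≤ PySem.Str.len "" :=
        PySem.List.key_head_sorted_le _ _ hsrt "" hmem
      have hr0 : r = "" := by
        apply pv_len_le_zero
        have : PySem.Str.len "" = 0 := by decide
        omega
      rw [List.find?_cons_of_pos (by rw [hQ r])]
      simp [hr0]
  rw [hB]
  exact hAne
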